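-- pv_equiv track=rewrite | github.com/ALTA-DE4-Miftahurrofiasidqi-bmzErpew/Basic-Programming-Part3 | hackerrank/sparse_arrays.py | machingStrings
-- ===== SOURCE A (Python) =====
-- def machingStrings(strings, queries):
--     result = []
--     for query in queries:
--         count = 0
--         for string in strings:
--             if string == query:
--                 count += 1
--         result.append(count)
--     return result
-- ===== SOURCE B (Python) =====
-- from bisect import bisect_left, bisect_right
--
-- def machingStrings(strings, queries):
--     s = sorted(strings)
--     return [bisect_right(s, query) - bisect_left(s, query) for query in queries]
-- ===== Notes on version B (the rewrite author's own statement) =====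
-- stated objective: faster
-- what changed: Replaces the per-query linear scan over strings with a one-time sort of a copy of strings plus two binary searches (bisect_left/bisect_right) per query.
import Mathlib
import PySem

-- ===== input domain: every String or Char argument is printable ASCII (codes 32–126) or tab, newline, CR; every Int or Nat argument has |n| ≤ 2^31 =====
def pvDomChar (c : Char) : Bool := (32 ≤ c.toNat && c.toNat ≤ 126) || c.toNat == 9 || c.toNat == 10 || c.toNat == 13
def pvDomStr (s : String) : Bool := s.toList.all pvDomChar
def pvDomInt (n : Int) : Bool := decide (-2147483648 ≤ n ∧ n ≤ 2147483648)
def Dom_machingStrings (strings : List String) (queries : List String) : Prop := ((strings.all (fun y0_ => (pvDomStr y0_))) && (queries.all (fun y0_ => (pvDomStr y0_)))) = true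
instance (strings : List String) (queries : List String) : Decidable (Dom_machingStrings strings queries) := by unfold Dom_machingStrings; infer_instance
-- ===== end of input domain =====

-- B replaces A's per-query linear scan with a one-time sort plus two binary searches per query.


-- ===== PORT A =====
def machingStrings (strings : List String) (queries : List String) : List Int :=
  queries.foldl (fun result query =>
    result ++ [strings.foldl (fun count string =>
      if string == query then count + 1 else count) (0 : Int)]) []

-- ===== PORT B =====
def machingStrings_alt (strings : List String) (queries : List String) : List Int :=
  let s := PySem.List.sorted strings (fun x => x) false
  queries.map (fun query =>
    ((PySem.List.bisectRight s query : Int) - (PySem.List.bisectLeft s query : Int)))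

-- ===== PRECONDITION & SPEC =====
def Spec_machingStrings (strings : List String) (queries : List String) (out : List Int) : Prop := out = machingStrings_alt strings queries
instance (strings : List String) (queries : List String) (out : List Int) : Decidable (Spec_machingStrings strings queries out) := by unfold Spec_machingStrings; infer_instance

-- ===== CLAIM (what is proved, stated in full; the proofs are below) =====
def Claim_equal_machingStrings : Prop := ∀ (strings : List String) (queries : List String), Dom_machingStrings strings queries → Spec_machingStrings strings queries (machingStrings strings queries)

-- ===== LEMMAS AND PROOFS =====

-- On a sorted list, a downward-closed predicate holds exactly on the first `countP p` positions.
theorem sorted_countP_iff (xs : List String) (p : String → Bool)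
    (hs : xs.Pairwise (fun a b => a ≤ b))
    (hmono : ∀ a b : String, a ≤ b → p b = true → p a = true)
    (j : Nat) (hj : j < xs.length) : p xs[j] = true ↔ j < xs.countP p := by
  have hpair := List.pairwise_iff_getElem.mp hs
  constructor
  · intro hpj
    have hlt : (xs.take (j+1)).length = j+1 := by
      rw [List.length_take]; omega
    have htake : (xs.take (j+1)).countP p = (xs.take (j+1)).length := by
      apply List.countP_eq_length.mpr
      intro a ha
      rcases List.getElem_of_mem ha with ⟨i, hi, rfl⟩
      have hij : i ≤ j := by omega
      have hilen : i < xs.length := by omega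
      rw [List.getElem_take]
      rcases Nat.lt_or_ge i j with hlt' | hge
      · exact hmono _ _ (hpair i j hilen hj hlt') hpj
      · have : i = j := by omega
        subst this; exact hpj
    have hsub : (xs.take (j+1)).countP p ≤ xs.countP p :=
      List.Sublist.countP_le (List.take_sublist _ _)
    omega
  · intro hk
    by_contra hpj
    have hdrop : (xs.drop j).countP p = 0 := by
      apply List.countP_eq_zero.mpr
      intro a ha
      rcases List.getElem_of_mem ha with ⟨i, hi, rfl⟩
      have hilen : j + i < xs.length := by
        have := List.length_drop (i := j) (l := xs); omega
      have hgd : (xs.drop j)[i] = xs[j + i] := List.getElem_drop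
      rw [hgd]
      intro hpa
      rcases Nat.eq_or_lt_of_le (Nat.le_add_right j i) with heq | hlt'
      · have : xs[j] = xs[j + i] := by congr 1
        rw [this] at hpj; exact hpj hpa
      · exact hpj (hmono _ _ (hpair j (j+i) hj hilen hlt') hpa)
    have hsplit : xs.countP p = (xs.take j).countP p + (xs.drop j).countP p := by
      conv_lhs => rw [← List.take_append_drop j xs]
      rw [List.countP_append]
    have h1 : (xs.take j).countP p ≤ (xs.take j).length := List.countP_le_length
    have h2 : (xs.take j).length ≤ j := by rw [List.length_take]; omega
    omega

-- bisectLeftLoop returns k whenever lo ≤ k ≤ hi and k is the pivot index of `· < x`.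
theorem blLoop_eq (xs : List String) (x : String) (k : Nat)
    (hiff : ∀ j (hj : j < xs.length), xs[j] < x ↔ j < k) :
    ∀ fuel lo hi, hi ≤ xs.length → hi - lo ≤ fuel → lo ≤ k → k ≤ hi →
      PySem.List.bisectLeftLoop xs x fuel lo hi = k := by
  intro fuel
  induction fuel with
  | zero => intro lo hi _ hfuel hlk hkh; simp [PySem.List.bisectLeftLoop]; omega
  | succ fuel ih =>
    intro lo hi hhi hfuel hlk hkh
    rw [PySem.List.bisectLeftLoop]
    by_cases hlh : lo < hi
    · simp only [hlh, if_true]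
      have hmid : (lo + hi) / 2 < xs.length := by omega
      rw [List.getElem?_eq_getElem hmid]
      by_cases hc : xs[(lo + hi) / 2] < x
      · simp only [hc, if_true]
        have := (hiff _ hmid).mp hc
        exact ih _ _ hhi (by omega) (by omega) hkh
      · simp only [hc, if_false]
        have : ¬ ((lo + hi) / 2 < k) := fun h => hc ((hiff _ hmid).mpr h)
        exact ih _ _ (by omega) (by omega) hlk (by omega)
    · simp only [hlh, if_false]; omega

-- bisectRightLoop returns k whenever lo ≤ k ≤ hi and k is the pivot index of `· ≤ x`.
theorem brLoop_eq (xs : List String) (x : String) (k : Nat)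
    (hiff : ∀ j (hj : j < xs.length), xs[j] ≤ x ↔ j < k) :
    ∀ fuel lo hi, hi ≤ xs.length → hi - lo ≤ fuel → lo ≤ k → k ≤ hi →
      PySem.List.bisectRightLoop xs x fuel lo hi = k := by
  intro fuel
  induction fuel with
  | zero => intro lo hi _ hfuel hlk hkh; simp [PySem.List.bisectRightLoop]; omega
  | succ fuel ih =>
    intro lo hi hhi hfuel hlk hkh
    rw [PySem.List.bisectRightLoop]
    by_cases hlh : lo < hi
    · simp only [hlh, if_true]
      have hmid : (lo + hi) / 2 < xs.length := by omega
      rw [List.getElem?_eq_getElem hmid]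
      by_cases hc : x < xs[(lo + hi) / 2]
      · simp only [hc, if_true]
        have : ¬ ((lo + hi) / 2 < k) := fun h => absurd ((hiff _ hmid).mpr h) (not_le.mpr hc)
        exact ih _ _ (by omega) (by omega) hlk (by omega)
      · simp only [hc, if_false]
        have := (hiff _ hmid).mp (not_lt.mp hc)
        exact ih _ _ hhi (by omega) (by omega) hkh
    · simp only [hlh, if_false]; omega

theorem bisectLeft_eq_countP (xs : List String) (x : String)
    (hs : xs.Pairwise (fun a b => a ≤ b)) :
    PySem.List.bisectLeft xs x = xs.countP (fun y => decide (y < x)) := by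
  have hiff : ∀ j (hj : j < xs.length), xs[j] < x ↔ j < xs.countP (fun y => decide (y < x)) := by
    intro j hj
    rw [← @decide_eq_true_iff (xs[j] < x)]
    exact sorted_countP_iff xs (fun y => decide (y < x)) hs
      (fun a b hab h => decide_eq_true (lt_of_le_of_lt hab (of_decide_eq_true h))) j hj
  exact blLoop_eq xs x _ hiff xs.length 0 xs.length le_rfl (by omega)
    (by omega) List.countP_le_length

theorem bisectRight_eq_countP (xs : List String) (x : String)
    (hs : xs.Pairwise (fun a b => a ≤ b)) :
    PySem.List.bisectRight xs x = xs.countP (fun y => decide (y ≤ x)) := by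
  have hiff : ∀ j (hj : j < xs.length), xs[j] ≤ x ↔ j < xs.countP (fun y => decide (y ≤ x)) := by
    intro j hj
    rw [← @decide_eq_true_iff (xs[j] ≤ x)]
    exact sorted_countP_iff xs (fun y => decide (y ≤ x)) hs
      (fun a b hab h => decide_eq_true (le_trans hab (of_decide_eq_true h))) j hj
  exact brLoop_eq xs x _ hiff xs.length 0 xs.length le_rfl (by omega)
    (by omega) List.countP_le_length

theorem countP_le_split (xs : List String) (x : String) :
    xs.countP (fun y => decide (y ≤ x)) = xs.countP (fun y => decide (y < x)) + xs.count x := by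
  induction xs with
  | nil => simp
  | cons a l ih =>
    rw [List.countP_cons, List.countP_cons, List.count_cons, ih]
    rcases lt_trichotomy a x with h | h | h
    · rw [if_pos (decide_eq_true (le_of_lt h)), if_pos (decide_eq_true h),
        if_neg (by simp [ne_of_lt h])]
      omega
    · subst h
      rw [if_pos (decide_eq_true le_rfl), if_neg (by simp), if_pos (by simp)]
      omega
    · rw [if_neg (by simp [not_le.mpr h]), if_neg (by simp [asymm h]),
        if_neg (by simp [(ne_of_lt h).symm])]
      omega

theorem foldl_count (strings : List String) (q : String) :
    ∀ c : Int, strings.foldl (fun count string => if string == q then count + 1 else count) c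
      = c + strings.count q := by
  induction strings with
  | nil => simp
  | cons a l ih =>
    intro c
    simp only [List.foldl_cons, List.count_cons, ih]
    by_cases h : a == q
    · simp [h]; omega
    · simp [h]

-- ===== VERDICT (by name: the statement is the Claim_ definition above) =====
theorem machingStrings_spec : Claim_equal_machingStrings := by
  intro strings queries _
  unfold Spec_machingStrings machingStrings machingStrings_alt
  set s := PySem.List.sorted strings (fun x => x) false with hsdef
  have hs : s.Pairwise (fun a b => a ≤ b) := by
    simpa using PySem.List.sorted_pairwise strings (fun x => x)
  have hperm : s.Perm strings := PySem.List.sorted_perm strings (fun x => x) false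
  rw [PySem.List.foldl_append_singleton_eq_map]
  apply List.map_congr_left
  intro q _
  rw [foldl_count strings q 0, ← hperm.count_eq q,
    bisectLeft_eq_countP s q hs, bisectRight_eq_countP s q hs, countP_le_split s q]
  push_cast; ring
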